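-- pv_equiv track=rewrite | github.com/Lyncs-API/lyncs | lyncs/utils/class_utils.py | add_parameters_to_doc
-- ===== SOURCE A (Python) =====
-- def add_parameters_to_doc(doc, doc_params):
--     """
--     Inserts doc_params in the first empty line after Parameters if possible.
--     """
--     doc = doc.split("\n")
--     found = False
--     for i, line in enumerate(doc):
--         words = line.split()
--         if not found and len(words) == 1 and words[0].startswith("Parameter"):
--             found = True
--         elif found and not words:
--             doc.insert(i, doc_params)
--             return "\n".join(doc)
--
--     return "\n".join(doc) + doc_params
-- ===== SOURCE B (Python) =====
-- def add_parameters_to_doc(doc, doc_params):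
--     """
--     Inserts doc_params in the first empty line after Parameters if possible.
--     """
--     lines = doc.split("\n")
--
--     def tag(line):
--         words = line.split()
--         if not words:
--             return "B"
--         if len(words) == 1 and words[0].startswith("Parameter"):
--             return "H"
--         return "."
--
--     tags = "".join(map(tag, lines))
--     h = tags.find("H")
--     if h != -1:
--         b = tags.find("B", h + 1)
--         if b != -1:
--             return "\n".join(lines[:b] + [doc_params] + lines[b:])
--     return "\n".join(lines) + doc_params
-- ===== Notes on version B (the rewrite author's own statement) =====
-- stated objective: alternative
-- what changed: Instead of A's flag-driven scan over the lines, B encodes each line once as a one-character tag ('H' header / 'B' blank / '.' other) into a tag string and delegates the search to str.find: h = tags.find('H'), b = tags.find('B', h+1), then splices doc_params in by slicing; no found flag and no explicit search loop remain.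
import Mathlib
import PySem

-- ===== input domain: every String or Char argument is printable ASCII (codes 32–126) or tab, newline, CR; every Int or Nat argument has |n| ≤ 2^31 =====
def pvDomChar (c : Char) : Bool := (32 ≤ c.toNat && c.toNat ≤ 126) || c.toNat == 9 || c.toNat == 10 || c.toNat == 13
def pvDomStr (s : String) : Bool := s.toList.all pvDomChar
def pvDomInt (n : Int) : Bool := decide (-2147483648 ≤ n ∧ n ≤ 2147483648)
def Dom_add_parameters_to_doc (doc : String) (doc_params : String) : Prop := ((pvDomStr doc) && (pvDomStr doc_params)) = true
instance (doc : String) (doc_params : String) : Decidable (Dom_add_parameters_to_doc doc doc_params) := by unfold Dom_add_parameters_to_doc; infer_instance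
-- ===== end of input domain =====

-- B replaces A's flag-driven scan by tagging each line once into a tag string and using str.find for both searches (objective: alternative).

-- ===== PORT A =====
-- the for-loop over enumerate(doc) with the 'found' flag; returns some result on early return, none if the loop falls through
def addLoopA (lines : List String) (doc_params : String) : List (Int × String) → Bool → Option String
  | [], _ => none
  | (i, line) :: rest, found =>
    let words := PySem.Str.split₀ line
    if (!found) && words.length == 1 && PySem.Str.startswith (words.headD "") "Parameter" then
      addLoopA lines doc_params rest true
    else if found && words.isEmpty then
      some (PySem.Str.join "\n" (PySem.List.insert lines i doc_params))
    else
      addLoopA lines doc_params rest found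

def add_parameters_to_doc (doc : String) (doc_params : String) : String :=
  let lines := (PySem.Str.split? doc "\n").getD []   -- sep "\n" ≠ "", so split? is always some
  match addLoopA lines doc_params (PySem.List.enumerate lines 0) false with
  | some s => s
  | none => PySem.Str.join "\n" lines ++ doc_params

-- ===== PORT B =====
-- Source B's tag(line): one character per line
def tagB (line : String) : Char :=
  if (PySem.Str.split₀ line).isEmpty then 'B'
  else if (PySem.Str.split₀ line).length == 1 && PySem.Str.startswith ((PySem.Str.split₀ line).headD "") "Parameter" then 'H'
  else '.'

-- hand port of str.find(c, start) for a SINGLE character needle on the tag list: exact, since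
-- Python's find with a one-char needle returns the first index ≥ start holding that character (or -1 = none here)
def findAuxB : List Char → Char → Option Nat
  | [], _ => none
  | c :: rest, t => if c = t then some 0 else (findAuxB rest t).map (· + 1)

def findFromB (tags : List Char) (t : Char) (start : Nat) : Option Nat :=
  (findAuxB (tags.drop start) t).map (start + ·)

def add_parameters_to_doc_alt (doc : String) (doc_params : String) : String :=
  let lines := (PySem.Str.split? doc "\n").getD []   -- sep "\n" ≠ "", so split? is always some
  let tags := lines.map tagB                          -- tags = "".join(map(tag, lines))
  match findFromB tags 'H' 0 with                     -- h = tags.find("H")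
  | some h =>
    match findFromB tags 'B' (h + 1) with             -- b = tags.find("B", h + 1)
    | some b => PySem.Str.join "\n" (lines.take b ++ [doc_params] ++ lines.drop b)  -- lines[:b] + [dp] + lines[b:]
    | none => PySem.Str.join "\n" lines ++ doc_params
  | none => PySem.Str.join "\n" lines ++ doc_params

-- ===== PRECONDITION & SPEC =====
def Spec_add_parameters_to_doc (doc : String) (doc_params : String) (out : String) : Prop := out = add_parameters_to_doc_alt doc doc_params
instance (doc : String) (doc_params : String) (out : String) : Decidable (Spec_add_parameters_to_doc doc doc_params out) := by unfold Spec_add_parameters_to_doc; infer_instance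

-- ===== CLAIM (what is proved, stated in full; the proofs are below) =====
def Claim_equal_add_parameters_to_doc : Prop := ∀ (doc : String) (doc_params : String), Dom_add_parameters_to_doc doc doc_params → Spec_add_parameters_to_doc doc doc_params (add_parameters_to_doc doc doc_params)

-- ===== LEMMAS AND PROOFS =====

-- the found=true phase of A from position a equals the 'B' search over the tag suffix
theorem loopA_true (lines : List String) (dp : String) :
    ∀ (t : List String), ∀ (a : Nat), lines.drop a = t →
    addLoopA lines dp (PySem.List.enumerate t (a : Int)) true =
      (findAuxB (t.map tagB) 'B').map
        (fun k => PySem.Str.join "\n" (lines.take (a + k) ++ [dp] ++ lines.drop (a + k))) := by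
  intro t
  induction t with
  | nil =>
    intro a _
    simp [PySem.List.enumerate, addLoopA, findAuxB]
  | cons x rest ih =>
    intro a h
    have ha : a < lines.length := by
      by_contra hc
      push Not at hc
      rw [List.drop_eq_nil_of_le hc] at h
      cases h
    have hrest : lines.drop (a + 1) = rest := by
      have h1 : lines.drop (a + 1) = (lines.drop a).drop 1 := by rw [List.drop_drop]
      rw [h1, h]; rfl
    rw [PySem.List.enumerate_cons, List.map_cons]
    by_cases hb : (PySem.Str.split₀ x).isEmpty = true
    · -- blank line: A inserts here, B's find hits at offset 0
      have htag : tagB x = 'B' := by simp [tagB, hb]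
      have hins : PySem.List.insert lines (a : Int) dp =
          lines.take a ++ dp :: lines.drop a :=
        PySem.List.insert_natCast lines a dp (le_of_lt ha)
      simp [addLoopA, findAuxB, htag, hb, hins]
    · have htag : tagB x ≠ 'B' := by
        simp only [Bool.not_eq_true] at hb
        unfold tagB
        rw [hb]
        simp only [Bool.false_eq_true, if_false]
        split_ifs <;> decide
      have hT := ih (a + 1) hrest
      push_cast at hT
      simp only [Bool.not_eq_true] at hb
      simp only [addLoopA, hb, Bool.and_false, Bool.false_eq_true, if_false,
        Bool.not_true, Bool.false_and, findAuxB, if_neg htag]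
      rw [hT]
      cases findAuxB (rest.map tagB) 'B' with
      | none => rfl
      | some k =>
        simp only [Option.map_some]
        have : a + 1 + k = a + (k + 1) := by omega
        rw [this]

-- the found=false phase of A equals the 'H' search followed by the 'B' search
theorem loopA_false (lines : List String) (dp : String) :
    ∀ (t : List String), ∀ (a : Nat), lines.drop a = t →
    addLoopA lines dp (PySem.List.enumerate t (a : Int)) false =
      (findAuxB (t.map tagB) 'H').bind (fun k =>
        (findAuxB ((lines.map tagB).drop (a + k + 1)) 'B').map
          (fun m => PySem.Str.join "\n"
            (lines.take (a + k + 1 + m) ++ [dp] ++ lines.drop (a + k + 1 + m)))) := by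
  intro t
  induction t with
  | nil =>
    intro a _
    simp [PySem.List.enumerate, addLoopA, findAuxB]
  | cons x rest ih =>
    intro a h
    have hrest : lines.drop (a + 1) = rest := by
      have h1 : lines.drop (a + 1) = (lines.drop a).drop 1 := by rw [List.drop_drop]
      rw [h1, h]; rfl
    have hdropmap : (lines.map tagB).drop (a + 1) = rest.map tagB := by
      rw [← List.map_drop, hrest]
    rw [PySem.List.enumerate_cons, List.map_cons]
    by_cases hc : ((PySem.Str.split₀ x).length == 1 &&
        PySem.Str.startswith ((PySem.Str.split₀ x).headD "") "Parameter") = true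
    · -- header line: A flips found, B's 'H' find hits at offset 0
      have hb : (PySem.Str.split₀ x).isEmpty = false := by
        cases hz : PySem.Str.split₀ x with
        | nil => rw [hz] at hc; simp at hc
        | cons _ _ => rfl
      have htag : tagB x = 'H' := by
        unfold tagB
        rw [hb]
        simp only [Bool.false_eq_true, if_false]
        rw [if_pos hc]
      have hT := loopA_true lines dp rest (a + 1) hrest
      push_cast at hT
      simp only [addLoopA, hc, Bool.not_false, Bool.true_and, if_true, findAuxB, htag,
        ]
      rw [hT]
      simp only [Option.bind_some, Nat.add_zero, hdropmap]
    · have htag : tagB x ≠ 'H' := by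
        unfold tagB
        by_cases h1 : (PySem.Str.split₀ x).isEmpty = true
        · rw [if_pos h1]; decide
        · rw [if_neg h1, if_neg hc]; decide
      have hF := ih (a + 1) hrest
      push_cast at hF
      simp only [addLoopA, hc, findAuxB, if_neg htag,
        Bool.not_false, Bool.true_and, Bool.false_and, Bool.false_eq_true, if_false]
      rw [hF]
      cases findAuxB (rest.map tagB) 'H' with
      | none => simp
      | some k =>
        simp only [Option.map_some, Option.bind_some]
        have he1 : a + 1 + k + 1 = a + (k + 1) + 1 := by omega
        rw [he1]

-- ===== VERDICT (by name: the statement is the Claim_ definition above) =====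
theorem add_parameters_to_doc_spec : Claim_equal_add_parameters_to_doc := by
  intro doc dp _
  show add_parameters_to_doc doc dp = add_parameters_to_doc_alt doc dp
  unfold add_parameters_to_doc add_parameters_to_doc_alt
  dsimp only
  generalize (PySem.Str.split? doc "\n").getD [] = lines
  have h0 := loopA_false lines dp lines 0 (by simp)
  rw [Nat.cast_zero] at h0
  rw [h0]
  unfold findFromB
  simp only [List.drop_zero]
  cases hH : findAuxB (lines.map tagB) 'H' with
  | none => simp
  | some k =>
    simp only [Option.map_some, Option.bind_some, Nat.zero_add]
    have hd : (lines.map tagB).drop (k + 1) = (lines.map tagB).drop (0 + k + 1) := by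
      congr 1; omega
    cases hB : findAuxB ((lines.map tagB).drop (0 + k + 1)) 'B' with
    | none => rw [hd, hB]; simp
    | some m =>
      rw [hd, hB]
      simp only [Option.map_some]
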